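-- pv_equiv track=rewrite | github.com/MolfarUA/CodeWars_Solutions | 6 kyu/Last Survivors Ep.3/solution.py | last_survivors
-- ===== SOURCE A (Python) =====
-- def last_survivors(arr, nums):
--     arr = list(map(list,arr))
--     for j in range(len(nums)):
--         k = len(arr)-1
--         while k >= 0 and nums[j] > 0:
--             if arr[k][j].isalpha():
--                 arr[k][j] = ' '
--                 nums[j] -= 1
--             k -= 1
--     answer = ''
--     for i in range(len(arr)):
--         for j in range(len(arr[i])):
--             if arr[i][j].isalpha():
--                 answer += arr[i][j]
--     return answer
-- ===== SOURCE B (Python) =====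
-- def last_survivors(arr, nums):
--     # Count alphabetic chars per column, derive how many survive from the top,
--     # then emit survivors in one row-major pass. Replicates A's in-place
--     # decrementing of nums.
--     keeps = []
--     for j in range(len(nums)):
--         t = sum(1 for row in arr if j < len(row) and row[j].isalpha())
--         if nums[j] > 0:
--             keeps.append(max(0, t - nums[j]))
--             nums[j] = max(0, nums[j] - t)
--         else:
--             keeps.append(t)
--     seen = [0] * len(nums)
--     answer = []
--     for row in arr:
--         for j, c in enumerate(row):
--             if c.isalpha():
--                 if j >= len(nums):
--                     answer.append(c)
--                 else:
--                     if seen[j] < keeps[j]: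
--                         answer.append(c)
--                     seen[j] += 1
--     return ''.join(answer)
-- ===== Notes on version B (the rewrite author's own statement) =====
-- stated objective: alternative
-- what changed: B never rewrites the grid: it counts each column's alphabetic characters once, turns nums[j] into a count of surviving top letters per column, and emits the answer in a single row-major pass with per-column seen counters (replicating A's in-place decrement of nums), instead of A's per-column bottom-up destructive blanking of a char-matrix.
import Mathlib
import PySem

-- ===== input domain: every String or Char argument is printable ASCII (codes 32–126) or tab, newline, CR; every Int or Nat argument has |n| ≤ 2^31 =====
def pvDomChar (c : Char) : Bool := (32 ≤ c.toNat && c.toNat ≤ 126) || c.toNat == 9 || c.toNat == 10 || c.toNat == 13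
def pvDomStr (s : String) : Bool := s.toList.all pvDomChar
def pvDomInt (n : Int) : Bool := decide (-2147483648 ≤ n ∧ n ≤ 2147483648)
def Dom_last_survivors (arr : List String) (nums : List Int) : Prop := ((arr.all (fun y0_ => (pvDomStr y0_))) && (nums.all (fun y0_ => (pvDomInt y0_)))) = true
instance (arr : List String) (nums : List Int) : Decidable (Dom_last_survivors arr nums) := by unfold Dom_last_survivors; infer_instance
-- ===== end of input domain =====

-- B replaces A's per-column bottom-up destructive blanking of a char-matrix by a
-- counting pass (surviving letters per column) plus one row-major emission pass.
-- Both A and B mutate the Python list `nums` in place identically; the equivalence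
-- proved here is about the RETURN value (Lean passes nums by value).
-- Python strings are handled as their char lists and rebuilt with String.ofList on return.

-- ===== PORT A =====
-- the inner while loop: k counts down (here k : Nat is the index+1), budget b = nums[j].
-- arr[k][j] on a too-short row raises IndexError in Python (excluded by Pre_);
-- the port reads ' ' (non-alphabetic) there via getD and continues.
def lsStrip1 (j : Nat) : Nat → Int → List (List Char) → List (List Char) × Int
  | 0, b, g => (g, b)
  | (k+1), b, g =>
    if 0 < b then
      let row := g.getD k []
      if PySem.Chars.isalpha (row.getD j ' ') then
        lsStrip1 j k (b - 1) (g.set k (row.set j ' '))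
      else lsStrip1 j k b g
    else (g, b)

def last_survivors (arr : List String) (nums : List Int) : String :=
  -- for j in range(len(nums)): run the while loop; nums[j] is only touched by its
  -- own column's loop, so its running value is carried as the budget b and written back;
  -- then: for each row, for each char, append it to the answer if alphabetic.
  String.ofList
    ((((List.range nums.length).foldl
        (fun (st : List (List Char) × List Int) j =>
          let r := lsStrip1 j st.1.length (st.2.getD j 0) st.1
          (r.1, st.2.set j r.2))
        (arr.map String.toList, nums)).1).foldl
      (fun acc row => row.foldl (fun a c => if PySem.Chars.isalpha c then a ++ [c] else a) acc) [])

-- ===== PORT B =====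
-- t = sum(1 for row in arr if j < len(row) and row[j].isalpha())
def lsColCnt (g : List (List Char)) (j : Nat) : Nat :=
  g.countP (fun row => decide (j < row.length) && PySem.Chars.isalpha (row.getD j ' '))

-- keeps[j] = number of column-j letters that survive (counted from the top)
def lsKeeps (g : List (List Char)) (nums : List Int) : List Int :=
  (List.range nums.length).map (fun j =>
    let t : Int := (lsColCnt g j : Int)
    let n := nums.getD j 0
    if 0 < n then max 0 (t - n) else t)

-- body of the row-major emission loop: state = (answer chars, seen counters)
def lsStep (nums : List Int) (keeps : List Int) (st : List Char × List Nat) (jc : Int × Char) : List Char × List Nat :=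
  if PySem.Chars.isalpha jc.2 then
    if (nums.length : Int) ≤ jc.1 then (st.1 ++ [jc.2], st.2)
    else
      let j := jc.1.toNat
      ((if (st.2.getD j 0 : Int) < keeps.getD j 0 then st.1 ++ [jc.2] else st.1),
       st.2.set j (st.2.getD j 0 + 1))
  else st

def last_survivors_alt (arr : List String) (nums : List Int) : String :=
  String.ofList
    (((arr.map String.toList).foldl
      (fun st row => (PySem.List.enumerate row).foldl
        (lsStep nums (lsKeeps (arr.map String.toList) nums)) st)
      (([] : List Char), List.replicate nums.length 0)).1)

-- ===== PRECONDITION & SPEC =====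
-- Pre_ excludes exactly the inputs where A raises IndexError: some row lacks column j
-- (row shorter than j+1) while fewer than nums[j] alphabetic column-j cells lie below it.
def Pre_last_survivors (arr : List String) (nums : List Int) : Prop :=
  ∀ j, j < nums.length → 0 < nums.getD j 0 →
    ∀ k, k < arr.length → ((arr.map String.toList).getD k []).length ≤ j →
      nums.getD j 0 ≤ ((((arr.map String.toList).drop (k+1)).countP
        (fun row => PySem.Chars.isalpha (row.getD j ' '))) : Int)
instance (arr : List String) (nums : List Int) : Decidable (Pre_last_survivors arr nums) := by
  unfold Pre_last_survivors; infer_instance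
def pvWitness_last_survivors : List String × List Int := (["ab", "cd"], [1])

def Spec_last_survivors (arr : List String) (nums : List Int) (out : String) : Prop := out = last_survivors_alt arr nums
instance (arr : List String) (nums : List Int) (out : String) : Decidable (Spec_last_survivors arr nums out) := by unfold Spec_last_survivors; infer_instance

-- ===== CLAIM (what is proved, stated in full; the proofs are below) =====
def Claim_equal_last_survivors : Prop := ∀ (arr : List String) (nums : List Int), Dom_last_survivors arr nums → Pre_last_survivors arr nums → Spec_last_survivors arr nums (last_survivors arr nums)

-- ===== LEMMAS AND PROOFS =====

-- the common reference: a cell survives iff it is alphabetic and either lies beyond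
-- the columns of nums or at least nums[j] alphabetic column-j cells lie strictly below it.
def alphaAt (j : Nat) (row : List Char) : Bool := PySem.Chars.isalpha (row.getD j ' ')
def cntA (j : Nat) (g : List (List Char)) : Nat := g.countP (alphaAt j)

def keepB (nums : List Int) (rest : List (List Char)) (j : Nat) (c : Char) : Bool :=
  PySem.Chars.isalpha c && (decide (nums.length ≤ j) || decide (nums.getD j 0 ≤ (cntA j rest : Int)))

def survRow (nums : List Int) (rest : List (List Char)) : Nat → List Char → List Char
  | _, [] => []
  | j, c :: cs => if keepB nums rest j c then c :: survRow nums rest (j+1) cs else survRow nums rest (j+1) cs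

def survGrid (nums : List Int) : List (List Char) → List Char
  | [] => []
  | row :: rest => survRow nums rest 0 row ++ survGrid nums rest

-- generic list-update helpers
theorem list_set_oob {α : Type} (l : List α) (n : Nat) (a : α) (h : l.length ≤ n) : l.set n a = l := by
  apply List.ext_getElem? ; intro i
  rw [List.getElem?_set]
  split
  · next h2 => subst h2; rw [if_neg (by omega), List.getElem?_eq_none (by omega)]
  · rfl

theorem list_getD_set_ne {α : Type} (l : List α) {n m : Nat} (v d : α) (h : n ≠ m) :
    (l.set n v).getD m d = l.getD m d := by
  simp [List.getD_eq_getElem?_getD, List.getElem?_set_ne h]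

theorem list_getD_set_self {α : Type} (l : List α) {n : Nat} (v d : α) (h : n < l.length) :
    (l.set n v).getD n d = v := by
  simp [List.getD_eq_getElem?_getD, List.getElem?_set_self h]

-- ===== B side =====
theorem colCnt_eq (g : List (List Char)) (j : Nat) : lsColCnt g j = cntA j g := by
  unfold lsColCnt cntA
  apply List.countP_congr
  intro row _
  unfold alphaAt
  by_cases h : j < row.length
  · simp [h]
  · rw [List.getD_eq_default _ _ (by omega)]
    simp [h]
    decide

theorem keeps_getD (g : List (List Char)) (nums : List Int) {j : Nat} (h : j < nums.length) :
    (lsKeeps g nums).getD j 0 =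
      if 0 < nums.getD j 0 then max 0 ((cntA j g : Int) - nums.getD j 0) else (cntA j g : Int) := by
  unfold lsKeeps
  rw [List.getD_eq_getElem?_getD, List.getElem?_map, List.getElem?_range (by simpa using h)]
  simp [colCnt_eq]

-- final value of the seen counters after one row
def bumpSeen (nlen : Nat) : Nat → List Char → List Nat → List Nat
  | _, [], seen => seen
  | j, c :: cs, seen =>
      bumpSeen nlen (j+1) cs (if PySem.Chars.isalpha c = true ∧ j < nlen then seen.set j (seen.getD j 0 + 1) else seen)

theorem bumpSeen_length (nlen : Nat) : ∀ (cs : List Char) (j : Nat) (seen : List Nat),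
    (bumpSeen nlen j cs seen).length = seen.length := by
  intro cs
  induction cs with
  | nil => intro j seen; rfl
  | cons c cs ih =>
      intro j seen
      unfold bumpSeen
      rw [ih]
      split <;> simp

theorem bumpSeen_getD (nlen : Nat) : ∀ (cs : List Char) (j : Nat) (seen : List Nat) (m : Nat),
    nlen ≤ seen.length →
    (bumpSeen nlen j cs seen).getD m 0 =
      seen.getD m 0 + (if j ≤ m ∧ m < nlen ∧ PySem.Chars.isalpha (cs.getD (m - j) ' ') = true then 1 else 0) := by
  intro cs
  induction cs with
  | nil =>
      intro j seen m _
      have hsp : PySem.Chars.isalpha ' ' = false := by decide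
      rw [bumpSeen, List.getD_nil, if_neg (by rintro ⟨_, _, h3⟩; rw [hsp] at h3; cases h3)]
      omega
  | cons c cs ih =>
      intro j seen m hl
      unfold bumpSeen
      set seen' := if PySem.Chars.isalpha c = true ∧ j < nlen then seen.set j (seen.getD j 0 + 1) else seen with hseen'
      have hl' : nlen ≤ seen'.length := by
        rw [hseen']; split <;> simp [hl]
      rw [ih (j+1) seen' m hl']
      rcases Nat.lt_trichotomy m j with hmj | hmj | hmj
      · have hid : seen'.getD m 0 = seen.getD m 0 := by
          rw [hseen']; split
          · exact list_getD_set_ne _ _ _ (by omega)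
          · rfl
        rw [hid, if_neg (by rintro ⟨h1, _⟩; omega), if_neg (by rintro ⟨h1, _⟩; omega)]
      · subst hmj
        have hz : (c :: cs).getD (m - m) ' ' = c := by
          rw [Nat.sub_self, List.getD_cons_zero]
        rw [if_neg (by rintro ⟨h1, _⟩; omega), hz, hseen']
        by_cases hc : PySem.Chars.isalpha c = true ∧ m < nlen
        · rw [if_pos hc, if_pos ⟨le_refl m, hc.2, hc.1⟩,
            list_getD_set_self _ _ _ (by omega)]
        · rw [if_neg hc, if_neg (by rintro ⟨_, h3, h4⟩; exact hc ⟨h4, h3⟩)]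
      · have hid : seen'.getD m 0 = seen.getD m 0 := by
          rw [hseen']; split
          · exact list_getD_set_ne _ _ _ (by omega)
          · rfl
        have hsub : m - j = (m - (j+1)) + 1 := by omega
        have hgd : (c :: cs).getD (m - j) ' ' = cs.getD (m - (j+1)) ' ' := by
          rw [hsub, List.getD_cons_succ]
        rw [hid, hgd]
        by_cases hrest : m < nlen ∧ PySem.Chars.isalpha (cs.getD (m - (j+1)) ' ') = true
        · rw [if_pos ⟨by omega, hrest.1, hrest.2⟩, if_pos ⟨by omega, hrest.1, hrest.2⟩]
        · rw [if_neg (by rintro ⟨_, h2, h3⟩; exact hrest ⟨h2, h3⟩),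
            if_neg (by rintro ⟨_, h2, h3⟩; exact hrest ⟨h2, h3⟩)]

theorem B_inner (nums keeps : List Int) (rest' : List (List Char)) :
    ∀ (cs : List Char) (j : Nat) (ans : List Char) (seen : List Nat),
    nums.length ≤ seen.length →
    (∀ t, j + t < nums.length → PySem.Chars.isalpha (cs.getD t ' ') = true →
       (((seen.getD (j+t) 0 : Int) < keeps.getD (j+t) 0) ↔
         (nums.getD (j+t) 0 ≤ (cntA (j+t) rest' : Int)))) →
    (PySem.List.enumerate cs (j : Int)).foldl (lsStep nums keeps) (ans, seen)
      = (ans ++ survRow nums rest' j cs, bumpSeen nums.length j cs seen) := by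
  intro cs
  induction cs with
  | nil =>
      intro j ans seen _ _
      simp [PySem.List.enumerate, survRow, bumpSeen]
  | cons c cs ih =>
      intro j ans seen hl H
      rw [PySem.List.enumerate_cons, List.foldl_cons]
      have hcast : ((j : Int) + 1) = ((j + 1 : Nat) : Int) := by push_cast; ring
      have hshift : ∀ t, (j+1) + t < nums.length → PySem.Chars.isalpha (cs.getD t ' ') = true →
          (((seen.getD ((j+1)+t) 0 : Int) < keeps.getD ((j+1)+t) 0) ↔
            (nums.getD ((j+1)+t) 0 ≤ (cntA ((j+1)+t) rest' : Int))) := by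
        intro t ht hal
        have := H (t+1) (by omega) (by simpa using hal)
        have harith : j + (t+1) = (j+1) + t := by omega
        rwa [harith] at this
      by_cases ha : PySem.Chars.isalpha c = true
      · by_cases hj : nums.length ≤ j
        · have hstep : lsStep nums keeps (ans, seen) ((j : Int), c) = (ans ++ [c], seen) := by
            unfold lsStep
            rw [if_pos ha, if_pos (show (nums.length : Int) ≤ ((j : Int), c).1 from by
              change (nums.length : Int) ≤ (j : Int); exact_mod_cast hj)]
          have hkeep : keepB nums rest' j c = true := by
            unfold keepB; simp [ha, hj]
          have hs : survRow nums rest' j (c :: cs) = c :: survRow nums rest' (j+1) cs := by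
            rw [survRow, hkeep]; simp
          have hbump : bumpSeen nums.length j (c :: cs) seen = bumpSeen nums.length (j+1) cs seen := by
            rw [bumpSeen, if_neg (by rintro ⟨_, h2⟩; omega)]
          rw [hstep, hcast, ih (j+1) (ans ++ [c]) seen hl hshift, hs, hbump]
          simp
        · rw [Nat.not_le] at hj
          have hkeep : keepB nums rest' j c =
              decide (nums.getD j 0 ≤ (cntA j rest' : Int)) := by
            unfold keepB; simp [ha, Nat.not_le.mpr hj]
          have hiff := H 0 (by omega) (by simpa using ha)
          simp only [Nat.add_zero] at hiff
          have hstep : lsStep nums keeps (ans, seen) ((j : Int), c) =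
              ((if (seen.getD j 0 : Int) < keeps.getD j 0 then ans ++ [c] else ans),
               seen.set j (seen.getD j 0 + 1)) := by
            unfold lsStep
            rw [if_pos ha, if_neg (show ¬ ((nums.length : Int) ≤ ((j : Int), c).1) by
              simp only []; rw [not_le]; exact_mod_cast hj)]
            simp
          have hbump : bumpSeen nums.length j (c :: cs) seen
              = bumpSeen nums.length (j+1) cs (seen.set j (seen.getD j 0 + 1)) := by
            rw [bumpSeen, if_pos ⟨ha, hj⟩]
          have hshift' : ∀ t, (j+1) + t < nums.length → PySem.Chars.isalpha (cs.getD t ' ') = true →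
              ((((seen.set j (seen.getD j 0 + 1)).getD ((j+1)+t) 0 : Int) < keeps.getD ((j+1)+t) 0) ↔
                (nums.getD ((j+1)+t) 0 ≤ (cntA ((j+1)+t) rest' : Int))) := by
            intro t ht hal
            rw [list_getD_set_ne _ _ _ (by omega)]
            exact hshift t ht hal
          rw [hstep, hcast, ih (j+1) _ _ (by simpa using hl) hshift', hbump]
          by_cases hk : (seen.getD j 0 : Int) < keeps.getD j 0
          · have hkt : keepB nums rest' j c = true := by rw [hkeep]; simpa using hiff.mp hk
            have hs : survRow nums rest' j (c :: cs) = c :: survRow nums rest' (j+1) cs := by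
              rw [survRow, hkt]; simp
            rw [if_pos hk, hs]
            simp
          · have hkf : keepB nums rest' j c = false := by
              rw [hkeep]; simpa using fun hc => hk (hiff.mpr hc)
            have hs : survRow nums rest' j (c :: cs) = survRow nums rest' (j+1) cs := by
              rw [survRow, hkf]; simp
            rw [if_neg hk, hs]
      · have hstep : lsStep nums keeps (ans, seen) ((j : Int), c) = (ans, seen) := by
          unfold lsStep
          rw [if_neg (show ¬ (PySem.Chars.isalpha ((j : Int), c).2 = true) by simpa using ha)]
        have hkf : keepB nums rest' j c = false := by
          unfold keepB; simp [ha]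
        have hs : survRow nums rest' j (c :: cs) = survRow nums rest' (j+1) cs := by
          rw [survRow, hkf]; simp
        have hbump : bumpSeen nums.length j (c :: cs) seen = bumpSeen nums.length (j+1) cs seen := by
          rw [bumpSeen, if_neg (by rintro ⟨h1, _⟩; exact ha h1)]
        rw [hstep, hcast, ih (j+1) ans seen hl hshift, hs, hbump]

theorem B_outer (g0 : List (List Char)) (nums : List Int) :
    ∀ (g done : List (List Char)) (ans : List Char) (seen : List Nat),
    seen.length = nums.length →
    (∀ m, m < nums.length → seen.getD m 0 = cntA m done) →
    g0 = done ++ g →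
    ∃ seen', (g.foldl (fun st row => (PySem.List.enumerate row).foldl (lsStep nums (lsKeeps g0 nums)) st) (ans, seen))
      = (ans ++ survGrid nums g, seen') := by
  intro g
  induction g with
  | nil =>
      intro done ans seen _ _ _
      exact ⟨seen, by simp [survGrid]⟩
  | cons row rest ih =>
      intro done ans seen hlen hinv hG
      rw [List.foldl_cons]
      have H : ∀ t, 0 + t < nums.length → PySem.Chars.isalpha (row.getD t ' ') = true →
          (((seen.getD (0+t) 0 : Int) < (lsKeeps g0 nums).getD (0+t) 0) ↔
            (nums.getD (0+t) 0 ≤ (cntA (0+t) rest : Int))) := by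
        intro t ht hal
        simp only [Nat.zero_add] at *
        rw [keeps_getD g0 nums ht, hinv t ht]
        have hsplit : cntA t g0 = cntA t done + ((if alphaAt t row then 1 else 0) + cntA t rest) := by
          rw [hG]
          unfold cntA
          rw [List.countP_append, List.countP_cons]
          omega
        have hrow : alphaAt t row = true := by unfold alphaAt; exact hal
        rw [hrow, if_pos rfl] at hsplit
        split
        · rw [hsplit]; push_cast; omega
        · rw [hsplit]; push_cast; omega
      have hinner := B_inner nums (lsKeeps g0 nums) rest row 0 ans seen (by omega) H
      simp only [Nat.cast_zero] at hinner
      rw [hinner]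
      have hlen' : (bumpSeen nums.length 0 row seen).length = nums.length := by
        rw [bumpSeen_length]; exact hlen
      have hinv' : ∀ m, m < nums.length →
          (bumpSeen nums.length 0 row seen).getD m 0 = cntA m (done ++ [row]) := by
        intro m hm
        rw [bumpSeen_getD nums.length row 0 seen m (by omega), hinv m hm]
        unfold cntA
        rw [List.countP_append]
        have : List.countP (alphaAt m) [row] = if PySem.Chars.isalpha (row.getD (m - 0) ' ') = true then 1 else 0 := by
          simp [List.countP_cons, alphaAt]
        rw [this]
        split
        · next h => rw [if_pos h.2.2]
        · next h => rw [if_neg (fun h3 => h ⟨Nat.zero_le m, hm, h3⟩)]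
      obtain ⟨seen', hrec⟩ := ih (done ++ [row]) (ans ++ survRow nums rest 0 row)
        (bumpSeen nums.length 0 row seen) hlen' hinv' (by rw [hG]; simp)
      exact ⟨seen', by rw [hrec, survGrid]; simp⟩

-- ===== A side =====
-- pointwise characterization of the inner while loop: scanning rows k-1..0 bottom-up
-- with budget b blanks exactly the alphabetic column-j cells having fewer than b
-- alphabetic column-j cells below them (within the scanned range).
theorem strip1_getElem? (j : Nat) : ∀ (k : Nat) (b : Int) (g : List (List Char)) (i : Nat),
    ((lsStrip1 j k b g).1)[i]? = (g[i]?).map (fun row =>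
      if alphaAt j row = true ∧ ((cntA j ((g.take k).drop (i+1)) : Int) < b) ∧ i < k
      then row.set j ' ' else row) := by
  intro k
  induction k with
  | zero =>
      intro b g i
      have hid : ∀ row : List Char,
          (if alphaAt j row = true ∧ ((cntA j ((g.take 0).drop (i+1)) : Int) < b) ∧ i < 0
           then row.set j ' ' else row) = row := by
        intro row; rw [if_neg (by rintro ⟨_, _, h3⟩; omega)]
      rw [lsStrip1]
      show g[i]? = _
      cases g[i]? with
      | none => rfl
      | some r => rw [Option.map_some, hid]
  | succ k ih =>
      intro b g i
      rw [lsStrip1]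
      by_cases hb : 0 < b
      case neg =>
        rw [if_neg hb]
        have hid : ∀ row : List Char,
            (if alphaAt j row = true ∧ ((cntA j ((g.take (k+1)).drop (i+1)) : Int) < b) ∧ i < k+1
             then row.set j ' ' else row) = row := by
          intro row
          rw [if_neg (by
            rintro ⟨_, h2, _⟩
            have hge : (0:Int) ≤ (cntA j ((g.take (k+1)).drop (i+1)) : Int) := by positivity
            omega)]
        show g[i]? = _
        cases g[i]? with
        | none => rfl
        | some r => rw [Option.map_some, hid]
      · rw [if_pos hb]
        by_cases ha : PySem.Chars.isalpha ((g.getD k []).getD j ' ') = true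
        · rw [if_pos ha]
          have hk : k < g.length := by
            by_contra hk
            rw [show g.getD k [] = [] from List.getD_eq_default _ _ (by omega),
              List.getD_nil] at ha
            exact absurd ha (by decide)
          set row := g.getD k [] with hrow
          have hrowk : g[k]? = some row := by
            rw [hrow, List.getD_eq_getElem?_getD, List.getElem?_eq_getElem hk]; rfl
          set g2 := g.set k (row.set j ' ') with hg2
          have htake : g2.take k = g.take k := by
            rw [hg2, List.take_set]
            exact list_set_oob _ _ _ (by rw [List.length_take]; omega)
          have htakes : g.take (k+1) = g.take k ++ [row] := by
            rw [List.take_add_one, List.getElem?_eq_getElem hk]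
            have : row = g[k] := by rw [hrow, List.getD_eq_getElem?_getD, List.getElem?_eq_getElem hk]; rfl
            rw [this]
            rfl
          have hlentk : (g.take k).length = k := by rw [List.length_take]; omega
          rw [ih (b-1) g2 i]
          rcases Nat.lt_trichotomy i k with hik | hik | hik
          · have hgi : g2[i]? = g[i]? := List.getElem?_set_ne (by omega)
            have halr : alphaAt j row = true := ha
            have e1 : cntA j ((g2.take k).drop (i+1)) = cntA j ((g.take k).drop (i+1)) := by
              rw [htake]
            have e2 : cntA j ((g.take (k+1)).drop (i+1)) = cntA j ((g.take k).drop (i+1)) + 1 := by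
              rw [htakes, List.drop_append, List.length_take,
                (show (i+1) - min k g.length = 0 by omega), List.drop_zero]
              unfold cntA
              rw [List.countP_append, List.countP_cons, List.countP_nil,
                (show alphaAt j row = true from halr), if_pos rfl, Nat.zero_add]
            rw [hgi]
            cases hgi2 : g[i]? with
            | none => rfl
            | some r =>
              rw [Option.map_some, Option.map_some]
              have hiff : (alphaAt j r = true ∧ ((cntA j ((g2.take k).drop (i+1)) : Int) < b - 1) ∧ i < k)
                  ↔ (alphaAt j r = true ∧ ((cntA j ((g.take (k+1)).drop (i+1)) : Int) < b) ∧ i < k+1) := by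
                constructor
                · rintro ⟨h1, h2, h3⟩
                  rw [e1] at h2
                  refine ⟨h1, ?_, by omega⟩
                  rw [e2]
                  push_cast at h2 ⊢
                  omega
                · rintro ⟨h1, h2, h3⟩
                  rw [e2] at h2
                  refine ⟨h1, ?_, by omega⟩
                  rw [e1]
                  push_cast at h2 ⊢
                  omega
              rw [if_congr hiff rfl rfl]
          · subst hik
            have hgi : g2[i]? = some (row.set j ' ') := List.getElem?_set_self (by omega)
            have hnil : (g.take (i+1)).drop (i+1) = [] :=
              List.drop_eq_nil_of_le (by rw [List.length_take]; omega)
            rw [hgi, hrowk, Option.map_some, Option.map_some,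
              if_neg (by rintro ⟨_, _, h3⟩; omega),
              if_pos ⟨ha, by rw [hnil]; simpa [cntA] using hb, by omega⟩]
          · have hgi : g2[i]? = g[i]? := List.getElem?_set_ne (by omega)
            rw [hgi]
            cases g[i]? with
            | none => rfl
            | some r =>
              rw [Option.map_some, Option.map_some,
                if_neg (by rintro ⟨_, _, h3⟩; omega), if_neg (by rintro ⟨_, _, h3⟩; omega)]
        · rw [if_neg ha, ih b g i]
          have hcnt : cntA j ((g.take (k+1)).drop (i+1)) = cntA j ((g.take k).drop (i+1)) := by
            by_cases hk : k < g.length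
            · have htakes : g.take (k+1) = g.take k ++ [g.getD k []] := by
                rw [List.take_add_one, List.getElem?_eq_getElem hk]
                have : g.getD k [] = g[k] := by
                  rw [List.getD_eq_getElem?_getD, List.getElem?_eq_getElem hk]; rfl
                rw [this]
                rfl
              by_cases hik : i < k
              · rw [htakes, List.drop_append, List.length_take,
                  (show (i+1) - min k g.length = 0 by omega), List.drop_zero]
                have hz : List.countP (alphaAt j) [g.getD k []] = 0 := by
                  rw [List.countP_cons, List.countP_nil]
                  have : alphaAt j (g.getD k []) = false := by
                    unfold alphaAt; simpa using ha
                  rw [this]; rfl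
                unfold cntA
                rw [List.countP_append, hz, Nat.add_zero]
              · have h1 : (g.take (k+1)).drop (i+1) = [] :=
                  List.drop_eq_nil_of_le (by rw [List.length_take]; omega)
                have h2 : (g.take k).drop (i+1) = [] :=
                  List.drop_eq_nil_of_le (by rw [List.length_take]; omega)
                rw [h1, h2]
            · rw [List.take_of_length_le (by omega), List.take_of_length_le (by omega)]
          cases hgi : g[i]? with
          | none => rfl
          | some r =>
            rw [Option.map_some, Option.map_some]
            by_cases hik : i = k
            · subst hik
              have hr : r = g.getD i [] := by
                rw [List.getD_eq_getElem?_getD, hgi]; rfl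
              have hna : alphaAt j r = false := by
                unfold alphaAt; rw [← hr] at ha; simpa using ha
              rw [if_neg (by rintro ⟨h1, _, _⟩; rw [hna] at h1; cases h1),
                if_neg (by rintro ⟨h1, _, _⟩; rw [hna] at h1; cases h1)]
            · have hiff : (alphaAt j r = true ∧ ((cntA j ((g.take k).drop (i+1)) : Int) < b) ∧ i < k)
                  ↔ (alphaAt j r = true ∧ ((cntA j ((g.take (k+1)).drop (i+1)) : Int) < b) ∧ i < k+1) := by
                rw [hcnt]
                constructor <;> rintro ⟨h1, h2, h3⟩ <;> exact ⟨h1, h2, by omega⟩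
              rw [if_congr hiff rfl rfl]

-- the grid after processing the first m columns
def blankRow (nums : List Int) (rest : List (List Char)) (m : Nat) : Nat → List Char → List Char
  | _, [] => []
  | j, c :: cs =>
      (if j < m ∧ PySem.Chars.isalpha c = true ∧ ((cntA j rest : Int) < nums.getD j 0) then ' ' else c)
        :: blankRow nums rest m (j+1) cs

def blankGrid (nums : List Int) (m : Nat) : List (List Char) → List (List Char)
  | [] => []
  | row :: rest => blankRow nums rest m 0 row :: blankGrid nums m rest

theorem blankRow_getElem? (nums : List Int) (rest : List (List Char)) (m : Nat) :
    ∀ (row : List Char) (j t : Nat),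
    (blankRow nums rest m j row)[t]? = (row[t]?).map (fun c =>
      if j + t < m ∧ PySem.Chars.isalpha c = true ∧ ((cntA (j+t) rest : Int) < nums.getD (j+t) 0)
      then ' ' else c) := by
  intro row
  induction row with
  | nil => intro j t; rfl
  | cons c cs ih =>
      intro j t
      cases t with
      | zero => rw [blankRow]; rfl
      | succ t =>
          rw [blankRow]
          show (blankRow nums rest m (j+1) cs)[t]? = _
          rw [ih (j+1) t]
          have : j + 1 + t = j + (t+1) := by omega
          rw [this]
          rfl

theorem blankGrid_getElem? (nums : List Int) (m : Nat) : ∀ (g : List (List Char)) (i : Nat),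
    (blankGrid nums m g)[i]? = (g[i]?).map (fun row => blankRow nums (g.drop (i+1)) m 0 row) := by
  intro g
  induction g with
  | nil => intro i; rfl
  | cons row rest ih =>
      intro i
      cases i with
      | zero => rfl
      | succ i =>
          rw [blankGrid]
          show (blankGrid nums m rest)[i]? = _
          rw [ih i]
          rfl

theorem blankRow_length (nums : List Int) (rest : List (List Char)) (m : Nat) :
    ∀ (row : List Char) (j : Nat), (blankRow nums rest m j row).length = row.length := by
  intro row
  induction row with
  | nil => intro j; rfl
  | cons c cs ih => intro j; rw [blankRow]; simp [ih (j+1)]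

theorem blankGrid_length (nums : List Int) (m : Nat) : ∀ (g : List (List Char)),
    (blankGrid nums m g).length = g.length := by
  intro g
  induction g with
  | nil => rfl
  | cons row rest ih => rw [blankGrid]; simp [ih]

theorem alphaAt_blankRow (nums : List Int) (rest : List (List Char)) {m j : Nat} (h : m ≤ j)
    (row : List Char) : alphaAt j (blankRow nums rest m 0 row) = alphaAt j row := by
  unfold alphaAt
  rw [List.getD_eq_getElem?_getD, List.getD_eq_getElem?_getD, blankRow_getElem? nums rest m row 0 j]
  cases row[j]? with
  | none => rfl
  | some c => rw [Option.map_some, if_neg (by rintro ⟨h1, _, _⟩; omega)]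

theorem cntA_blankGrid (nums : List Int) {m j : Nat} (h : m ≤ j) : ∀ (g : List (List Char)),
    cntA j (blankGrid nums m g) = cntA j g := by
  intro g
  induction g with
  | nil => rfl
  | cons row rest ih =>
      rw [blankGrid]
      unfold cntA at *
      rw [List.countP_cons, List.countP_cons, alphaAt_blankRow nums rest h row, ih]

theorem blankGrid_drop (nums : List Int) (m : Nat) : ∀ (g : List (List Char)) (n : Nat),
    (blankGrid nums m g).drop n = blankGrid nums m (g.drop n) := by
  intro g
  induction g with
  | nil => intro n; simp [blankGrid]
  | cons row rest ih =>
      intro n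
      cases n with
      | zero => rfl
      | succ n => rw [blankGrid]; show (blankGrid nums m rest).drop n = _ ; rw [ih n]; rfl

theorem blankRow_zero (nums : List Int) (rest : List (List Char)) :
    ∀ (row : List Char) (j : Nat), blankRow nums rest 0 j row = row := by
  intro row
  induction row with
  | nil => intro j; rfl
  | cons c cs ih =>
      intro j
      rw [blankRow, if_neg (by rintro ⟨h1, _, _⟩; omega), ih (j+1)]

theorem blankGrid_zero (nums : List Int) : ∀ (g : List (List Char)),
    blankGrid nums 0 g = g := by
  intro g
  induction g with
  | nil => rfl
  | cons row rest ih => rw [blankGrid, blankRow_zero, ih]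

-- one column step at the level of a single row
theorem blankRow_step (nums : List Int) (rest : List (List Char)) (m : Nat) (row : List Char) :
    (if alphaAt m row = true ∧ ((cntA m rest : Int) < nums.getD m 0)
     then (blankRow nums rest m 0 row).set m ' ' else blankRow nums rest m 0 row)
      = blankRow nums rest (m+1) 0 row := by
  apply List.ext_getElem?
  intro t
  rw [blankRow_getElem? nums rest (m+1) row 0 t]
  by_cases hc : alphaAt m row = true ∧ ((cntA m rest : Int) < nums.getD m 0)
  · rw [if_pos hc]
    by_cases htm : t = m
    · subst htm
      have hlt : t < row.length := by
        by_contra hlt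
        have : alphaAt t row = false := by
          unfold alphaAt
          rw [List.getD_eq_default _ _ (by omega)]
          decide
        rw [this] at hc
        exact absurd hc.1 (by simp)
      rw [List.getElem?_set_self (by rw [blankRow_length]; omega),
        List.getElem?_eq_getElem hlt, Option.map_some]
      have hcell : row[t] = row.getD t ' ' := by
        rw [List.getD_eq_getElem?_getD, List.getElem?_eq_getElem hlt]; rfl
      have halc : PySem.Chars.isalpha row[t] = true := by
        rw [hcell]; exact hc.1
      rw [if_pos ⟨by omega, halc, by simpa using hc.2⟩]
    · rw [List.getElem?_set_ne (by omega), blankRow_getElem? nums rest m row 0 t]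
      cases row[t]? with
      | none => rfl
      | some c =>
        rw [Option.map_some, Option.map_some]
        have hiff : (0 + t < m ∧ PySem.Chars.isalpha c = true ∧ ((cntA (0+t) rest : Int) < nums.getD (0+t) 0))
            ↔ (0 + t < m+1 ∧ PySem.Chars.isalpha c = true ∧ ((cntA (0+t) rest : Int) < nums.getD (0+t) 0)) := by
          constructor <;> rintro ⟨h1, h2, h3⟩ <;> exact ⟨by omega, h2, h3⟩
        rw [if_congr hiff rfl rfl]
  · rw [if_neg hc, blankRow_getElem? nums rest m row 0 t]
    cases hrt : row[t]? with
    | none => rfl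
    | some c =>
      rw [Option.map_some, Option.map_some]
      by_cases htm : t = m
      · subst htm
        have hcell : row.getD t ' ' = c := by
          rw [List.getD_eq_getElem?_getD, hrt]; rfl
        have hnc : ¬ (PySem.Chars.isalpha c = true ∧ ((cntA t rest : Int) < nums.getD t 0)) := by
          rintro ⟨h1, h2⟩
          exact hc ⟨by unfold alphaAt; rw [hcell]; exact h1, h2⟩
        rw [if_neg (by rintro ⟨_, h2, h3⟩; exact hnc ⟨h2, by simpa using h3⟩),
          if_neg (by rintro ⟨_, h2, h3⟩; exact hnc ⟨h2, by simpa using h3⟩)]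
      · have hiff : (0 + t < m ∧ PySem.Chars.isalpha c = true ∧ ((cntA (0+t) rest : Int) < nums.getD (0+t) 0))
            ↔ (0 + t < m+1 ∧ PySem.Chars.isalpha c = true ∧ ((cntA (0+t) rest : Int) < nums.getD (0+t) 0)) := by
          constructor <;> rintro ⟨h1, h2, h3⟩ <;> exact ⟨by omega, h2, h3⟩
        rw [if_congr hiff rfl rfl]

-- the outer fold over the columns
theorem foldA (g0 : List (List Char)) (nums : List Int) : ∀ (m : Nat), m ≤ nums.length →
    ∃ ns, ((List.range m).foldl
      (fun (st : List (List Char) × List Int) j =>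
        let r := lsStrip1 j st.1.length (st.2.getD j 0) st.1
        (r.1, st.2.set j r.2))
      (g0, nums)) = (blankGrid nums m g0, ns)
      ∧ ∀ j', m ≤ j' → ns.getD j' 0 = nums.getD j' 0 := by
  intro m
  induction m with
  | zero =>
      intro _
      exact ⟨nums, by rw [List.range_zero, List.foldl_nil, blankGrid_zero], fun _ _ => rfl⟩
  | succ m ih =>
      intro hm
      obtain ⟨ns, hfold, hns⟩ := ih (by omega)
      rw [List.range_succ, List.foldl_append, hfold, List.foldl_cons, List.foldl_nil]
      refine ⟨ns.set m (lsStrip1 m (blankGrid nums m g0).length (ns.getD m 0) (blankGrid nums m g0)).2, ?_, ?_⟩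
      · show ((lsStrip1 m (blankGrid nums m g0).length (ns.getD m 0) (blankGrid nums m g0)).1,
              ns.set m (lsStrip1 m (blankGrid nums m g0).length (ns.getD m 0) (blankGrid nums m g0)).2) = _
        have hb : ns.getD m 0 = nums.getD m 0 := hns m (le_refl m)
        have hgrid : (lsStrip1 m (blankGrid nums m g0).length (nums.getD m 0) (blankGrid nums m g0)).1
            = blankGrid nums (m+1) g0 := by
          apply List.ext_getElem?
          intro i
          rw [strip1_getElem?, blankGrid_getElem?, blankGrid_getElem?]
          cases hgi : g0[i]? with
          | none => rfl
          | some row =>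
            have hilen : i < (blankGrid nums m g0).length := by
              rw [blankGrid_length]
              exact (List.getElem?_eq_some_iff.mp hgi).1
            rw [Option.map_some, Option.map_some, Option.map_some]
            have hcnt : cntA m (((blankGrid nums m g0).take (blankGrid nums m g0).length).drop (i+1))
                = cntA m (g0.drop (i+1)) := by
              rw [List.take_length, blankGrid_drop, cntA_blankGrid nums (le_refl m)]
            have hal : alphaAt m (blankRow nums (g0.drop (i+1)) m 0 row) = alphaAt m row :=
              alphaAt_blankRow nums (g0.drop (i+1)) (le_refl m) row
            by_cases hc : alphaAt m row = true ∧ ((cntA m (g0.drop (i+1)) : Int) < nums.getD m 0)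
            · rw [if_pos ⟨by rw [hal]; exact hc.1, by rw [hcnt]; exact hc.2, hilen⟩]
              rw [← blankRow_step nums (g0.drop (i+1)) m row, if_pos hc]
            · rw [if_neg (by rintro ⟨h1, h2, _⟩
                             exact hc ⟨by rw [hal] at h1; exact h1, by rw [hcnt] at h2; exact h2⟩)]
              rw [← blankRow_step nums (g0.drop (i+1)) m row, if_neg hc]
        rw [hb, hgrid]
      · intro j' hj'
        rw [list_getD_set_ne _ _ _ (by omega)]
        exact hns j' (by omega)

-- answer extraction
theorem foldl_filter_row : ∀ (row : List Char) (a : List Char),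
    row.foldl (fun a c => if PySem.Chars.isalpha c then a ++ [c] else a) a
      = a ++ row.filter (fun c => PySem.Chars.isalpha c) := by
  intro row
  induction row with
  | nil => intro a; simp
  | cons c cs ih =>
      intro a
      rw [List.foldl_cons, List.filter_cons]
      by_cases hc : PySem.Chars.isalpha c
      · rw [if_pos hc, if_pos hc, ih]; simp
      · rw [if_neg hc, if_neg (by simpa using hc), ih]

theorem blankRow_filter (nums : List Int) (rest : List (List Char)) : ∀ (row : List Char) (j : Nat),
    (blankRow nums rest nums.length j row).filter (fun c => PySem.Chars.isalpha c)
      = survRow nums rest j row := by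
  intro row
  induction row with
  | nil => intro j; rfl
  | cons c cs ih =>
      intro j
      rw [blankRow, survRow, List.filter_cons]
      by_cases h1 : j < nums.length ∧ PySem.Chars.isalpha c = true ∧ ((cntA j rest : Int) < nums.getD j 0)
      · rw [if_pos h1]
        have hsp : (PySem.Chars.isalpha ' ' = true) = False := by simp; decide
        have hkf : keepB nums rest j c = false := by
          unfold keepB
          rw [h1.2.1]
          simp only [Bool.true_and]
          rw [Bool.or_eq_false_iff]
          exact ⟨by simp; omega, by simp; exact h1.2.2⟩
        rw [hkf, if_neg (by rw [hsp]; exact id), ih (j+1)]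
        simp
      · rw [if_neg h1]
        by_cases hc : PySem.Chars.isalpha c = true
        · have hkt : keepB nums rest j c = true := by
            unfold keepB
            rw [hc]
            simp only [Bool.true_and]
            rw [Bool.or_eq_true_iff]
            by_cases hj : j < nums.length
            · right
              simp only [decide_eq_true_iff]
              by_contra hcnt
              exact h1 ⟨hj, hc, by omega⟩
            · left; simp; omega
          rw [hkt, if_pos hc, ih (j+1)]
          simp
        · have hkf : keepB nums rest j c = false := by
            unfold keepB; rw [Bool.eq_false_iff.mpr hc]; simp
          rw [hkf, if_neg (by simpa using hc), ih (j+1)]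
          simp

theorem A_final (nums : List Int) : ∀ (g : List (List Char)) (a : List Char),
    (blankGrid nums nums.length g).foldl
      (fun acc row => row.foldl (fun a c => if PySem.Chars.isalpha c then a ++ [c] else a) acc) a
      = a ++ survGrid nums g := by
  intro g
  induction g with
  | nil => intro a; simp [blankGrid, survGrid]
  | cons row rest ih =>
      intro a
      rw [blankGrid, survGrid, List.foldl_cons, foldl_filter_row, blankRow_filter, ih]
      simp

theorem A_eq_surv (arr : List String) (nums : List Int) :
    last_survivors arr nums = String.ofList (survGrid nums (arr.map String.toList)) := by
  unfold last_survivors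
  obtain ⟨ns, hfold, _⟩ := foldA (arr.map String.toList) nums nums.length (le_refl _)
  rw [hfold]
  show String.ofList ((blankGrid nums nums.length (arr.map String.toList)).foldl _ []) = _
  rw [A_final]
  rfl

theorem B_eq_surv (arr : List String) (nums : List Int) :
    last_survivors_alt arr nums = String.ofList (survGrid nums (arr.map String.toList)) := by
  unfold last_survivors_alt
  obtain ⟨seen', h⟩ := B_outer (arr.map String.toList) nums (arr.map String.toList) [] []
    (List.replicate nums.length 0) (by simp)
    (fun m hm => by rw [List.getD_replicate _ hm]; simp [cntA])
    (by simp)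
  rw [h]
  simp

-- ===== VERDICT (by name: the statement is the Claim_ definition above) =====
theorem last_survivors_spec : Claim_equal_last_survivors := by
  intro arr nums _ _
  unfold Spec_last_survivors
  rw [A_eq_surv, B_eq_surv]
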